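-- pv_equiv track=rewrite | github.com/MrBrantCode/unitest_baseline | mut_generate/mist_train_cf/cf_4668/solution.py | sum_vowels
-- ===== SOURCE A (Python) =====
-- def sum_vowels(s):
--     """
--     Calculate the sum of the values of all lowercase vowels in a string,
--     excluding any characters that are not letters. The function ignores any
--     vowels that are repeated consecutively more than two times. The value of
--     a vowel is determined by its position in the alphabet, where 'a' is 1,
--     'b' is 2, and so on.
--
--     Args:
--         s (str): The input string.
--
--     Returns:
--         int: The sum of the values of all lowercase vowels in the string.
--     """
--
--     vowels = "aeiou"
--     sum_vowels = 0
--     consecutive_count = 0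
--
--     for char in s.lower():
--         if char.isalpha() and char in vowels:
--             if consecutive_count < 2:
--                 sum_vowels += ord(char) - ord('a') + 1
--                 consecutive_count += 1
--             else:
--                 consecutive_count = 0
--         else:
--             consecutive_count = 0
--
--     return sum_vowels
-- ===== SOURCE B (Python) =====
-- def sum_vowels(s):
--     """Same result as A: scan maximal vowel runs; within each run every third
--     vowel (run-local index k with k % 3 == 2) is skipped; non-vowels reset runs."""
--     def run_value(run):
--         return sum(ord(c) - 96 for k, c in enumerate(run) if k % 3 != 2)
--
--     total = 0
--     t = s.lower()
--     while t:
--         if t[0] in "aeiou":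
--             j = 1
--             while j < len(t) and t[j] in "aeiou":
--                 j += 1
--             total += run_value(t[:j])
--             t = t[j:]
--         else:
--             t = t[1:]
--     return total
-- ===== Notes on version B (the rewrite author's own statement) =====
-- stated objective: alternative
-- what changed: Replaces A's per-character counter state machine by an explicit decomposition into maximal vowel runs: each run is extracted with an inner scan and scored by summing ord(c)-96 over run-local indices k with k % 3 != 2.
import Mathlib
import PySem

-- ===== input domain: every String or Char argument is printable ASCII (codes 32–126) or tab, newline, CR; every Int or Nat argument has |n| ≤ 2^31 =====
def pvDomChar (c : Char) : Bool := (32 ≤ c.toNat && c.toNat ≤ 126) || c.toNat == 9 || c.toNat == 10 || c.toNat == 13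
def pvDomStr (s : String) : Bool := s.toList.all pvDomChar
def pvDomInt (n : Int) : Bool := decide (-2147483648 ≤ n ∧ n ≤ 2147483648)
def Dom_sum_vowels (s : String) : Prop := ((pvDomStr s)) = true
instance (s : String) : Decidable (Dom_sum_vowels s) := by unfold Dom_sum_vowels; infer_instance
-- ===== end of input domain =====

-- B replaces A's per-character counter state machine by an explicit maximal-vowel-run
-- decomposition (alternative, same cost); return values proved equal on all of Dom.

-- ===== PORT A =====
-- `char in "aeiou"` for a single char
def pvVowel (c : Char) : Bool := c = 'a' || c = 'e' || c = 'i' || c = 'o' || c = 'u'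

def sum_vowels (s : String) : Int :=
  (((PySem.Str.lower s).toList).foldl
    (fun (st : Int × Int) ch =>
      if PySem.Chars.isalpha ch && pvVowel ch then
        if st.2 < 2 then (st.1 + ((ch.toNat : Int) - 97 + 1), st.2 + 1)
        else (st.1, 0)
      else (st.1, 0))
    (0, 0)).1

-- ===== PORT B =====
-- run_value(run) = sum(ord(c) - 96 for k, c in enumerate(run) if k % 3 != 2)
def pvRunVal (run : List Char) : Int :=
  (PySem.List.enumerate run).foldl
    (fun acc kc => if kc.1 % 3 ≠ 2 then acc + ((kc.2.toNat : Int) - 96) else acc) 0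

-- the while loop over t: extract the maximal vowel prefix (the inner `j` scan /
-- t[:j], t[j:]) or drop one non-vowel char
def pvGoB : List Char → Int
  | [] => 0
  | c :: rest =>
    if pvVowel c then
      pvRunVal ((c :: rest).takeWhile pvVowel) + pvGoB ((c :: rest).dropWhile pvVowel)
    else
      pvGoB rest
termination_by l => l.length
decreasing_by
  · simp only [List.dropWhile_cons, *]
    exact Nat.lt_succ_of_le (List.length_dropWhile_le _ _)
  · simp

def sum_vowels_alt (s : String) : Int := pvGoB (PySem.Str.lower s).toList

-- ===== PRECONDITION & SPEC =====
def Spec_sum_vowels (s : String) (out : Int) : Prop := out = sum_vowels_alt s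
instance (s : String) (out : Int) : Decidable (Spec_sum_vowels s out) := by unfold Spec_sum_vowels; infer_instance

-- ===== CLAIM (what is proved, stated in full; the proofs are below) =====
def Claim_equal_sum_vowels : Prop := ∀ (s : String), Dom_sum_vowels s → Spec_sum_vowels s (sum_vowels s)

-- ===== LEMMAS AND PROOFS =====

-- A's loop body unrolled into a recursion on the list, counter generalized
def pvF : List Char → Int → Int
  | [], _ => 0
  | c :: r, cnt =>
    if pvVowel c then
      if cnt < 2 then ((c.toNat : Int) - 97 + 1) + pvF r (cnt + 1) else pvF r 0
    else pvF r 0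

-- run value with an explicit start index (relates enumerate to the run)
def pvH : List Char → Nat → Int
  | [], _ => 0
  | c :: r, k => (if k % 3 ≠ 2 then (c.toNat : Int) - 96 else 0) + pvH r (k + 1)

def pvHeadNotVowel : List Char → Prop
  | [] => True
  | c :: _ => pvVowel c = false

theorem pvVowel_isalpha (c : Char) (h : pvVowel c = true) : PySem.Chars.isalpha c = true := by
  simp [pvVowel] at h
  rcases h with (((h | h) | h) | h) | h <;> subst h <;> decide

theorem pvFoldlA (l : List Char) (sum cnt : Int) :
    (l.foldl
      (fun (st : Int × Int) ch =>
        if PySem.Chars.isalpha ch && pvVowel ch then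
          if st.2 < 2 then (st.1 + ((ch.toNat : Int) - 97 + 1), st.2 + 1)
          else (st.1, 0)
        else (st.1, 0))
      (sum, cnt)).1 = sum + pvF l cnt := by
  induction l generalizing sum cnt with
  | nil => simp [pvF]
  | cons c r ih =>
    rw [List.foldl_cons]
    by_cases hv : pvVowel c = true
    · have hcond : (PySem.Chars.isalpha c && pvVowel c) = true := by
        simp [pvVowel_isalpha c hv, hv]
      rw [if_pos hcond]
      by_cases hc : cnt < 2
      · rw [if_pos hc, ih]
        conv_rhs => rw [pvF]
        rw [if_pos hv, if_pos hc]
        ring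
      · rw [if_neg hc, ih]
        conv_rhs => rw [pvF]
        rw [if_pos hv, if_neg hc]
    · have hcond : ¬ ((PySem.Chars.isalpha c && pvVowel c) = true) := by simp [hv]
      rw [if_neg hcond, ih]
      conv_rhs => rw [pvF]
      rw [if_neg hv]

theorem pvF_reset (l : List Char) (h : pvHeadNotVowel l) (c c' : Int) :
    pvF l c = pvF l c' := by
  cases l with
  | nil => rfl
  | cons x r => simp_all [pvF, pvHeadNotVowel]

theorem pvRunLem (run : List Char) (tail : List Char)
    (hrun : ∀ x ∈ run, pvVowel x = true) (htail : pvHeadNotVowel tail) (k : Nat) :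
    pvF (run ++ tail) ((k % 3 : Nat) : Int) = pvH run k + pvF tail 0 := by
  induction run generalizing k with
  | nil => simpa [pvH] using pvF_reset tail htail _ 0
  | cons c r ih =>
    have hv : pvVowel c = true := hrun c (List.mem_cons_self)
    have hr : ∀ x ∈ r, pvVowel x = true := fun x hx => hrun x (List.mem_cons_of_mem _ hx)
    rw [List.cons_append, pvF, if_pos hv]
    by_cases hk : k % 3 = 2
    · have hlt : ¬ ((k % 3 : Nat) : Int) < 2 := by omega
      have h1 : (((k + 1) % 3 : Nat) : Int) = 0 := by omega
      have h2 := ih hr (k + 1)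
      rw [h1] at h2
      rw [if_neg hlt, h2]
      conv_rhs => rw [pvH]
      rw [if_neg (by omega : ¬ ¬ k % 3 = 2)]
      ring
    · have hlt : ((k % 3 : Nat) : Int) < 2 := by omega
      have h1 : (((k + 1) % 3 : Nat) : Int) = ((k % 3 : Nat) : Int) + 1 := by omega
      have h2 := ih hr (k + 1)
      rw [h1] at h2
      rw [if_pos hlt, h2]
      conv_rhs => rw [pvH]
      rw [if_pos hk]
      ring

theorem pvEnumFoldl (run : List Char) (k : Nat) (acc : Int) :
    (PySem.List.enumerate run (k : Int)).foldl
      (fun acc kc => if kc.1 % 3 ≠ 2 then acc + ((kc.2.toNat : Int) - 96) else acc) acc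
      = acc + pvH run k := by
  induction run generalizing k acc with
  | nil => simp [PySem.List.enumerate_nil, pvH]
  | cons c r ih =>
    have hmod : ((k : Int) % 3 ≠ 2) ↔ (k % 3 ≠ 2) := by omega
    rw [PySem.List.enumerate_cons]
    simp only [List.foldl_cons]
    by_cases hk : k % 3 = 2
    · have : ¬ ((k : Int) % 3 ≠ 2) := by omega
      rw [if_neg this]
      have := ih (k + 1) acc
      push_cast at this ⊢
      rw [this]
      simp [pvH, hk]
    · have : ((k : Int) % 3 ≠ 2) := by omega
      rw [if_pos this]
      have := ih (k + 1) (acc + ((c.toNat : Int) - 96))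
      push_cast at this ⊢
      rw [this]
      simp [pvH, hk]
      ring

theorem pvRunVal_eq (run : List Char) : pvRunVal run = pvH run 0 := by
  have := pvEnumFoldl run 0 0
  simpa [pvRunVal] using this

theorem pvHeadNotVowel_dropWhile (l : List Char) :
    pvHeadNotVowel (l.dropWhile pvVowel) := by
  induction l with
  | nil => trivial
  | cons c r ih =>
    by_cases hv : pvVowel c = true
    · simpa [List.dropWhile_cons, hv] using ih
    · have hf : pvVowel c = false := by simpa using hv
      simp [hf, pvHeadNotVowel]

theorem pvGoB_eq (l : List Char) : pvGoB l = pvF l 0 := by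
  induction l using pvGoB.induct with
  | case1 => simp [pvGoB, pvF]
  | case2 c rest hv ih =>
    rw [pvGoB, if_pos hv]
    have hsplit : (c :: rest).takeWhile pvVowel ++ (c :: rest).dropWhile pvVowel
        = c :: rest := List.takeWhile_append_dropWhile
    have hrun : ∀ x ∈ (c :: rest).takeWhile pvVowel, pvVowel x = true :=
      fun x hx => List.mem_takeWhile_imp hx
    have htail := pvHeadNotVowel_dropWhile (c :: rest)
    have h0 : ((0 % 3 : Nat) : Int) = 0 := by norm_num
    have hmain := pvRunLem ((c :: rest).takeWhile pvVowel) ((c :: rest).dropWhile pvVowel)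
      hrun htail 0
    rw [h0, hsplit] at hmain
    rw [pvRunVal_eq, ih, hmain]
  | case3 c rest hv ih =>
    rw [pvGoB, if_neg hv, ih]
    simp [pvF, hv]

-- ===== VERDICT (by name: the statement is the Claim_ definition above) =====
theorem sum_vowels_spec : Claim_equal_sum_vowels := by
  intro s _
  unfold Spec_sum_vowels sum_vowels sum_vowels_alt
  rw [pvFoldlA, pvGoB_eq]
  simp
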